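-- pv_equiv track=rewrite | github.com/sayyedrabeeh/Python-FullStack | Python/pratical/secondnonrepeating.py | lastrepeat
-- ===== SOURCE A (Python) =====
-- def lastrepeat(a):
--     b = {}
--     for i in a:
--         b[i] = b.get(i,0) + 1
--     unique = [i for i in reversed(b) if b[i]==1]
--     if len(unique) >= 2:
--         return unique[1]
--     else:
--         return 'None'
-- ===== SOURCE B (Python) =====
-- def lastrepeat(a):
--     counts = {}
--     for x in a:
--         counts[x] = counts.get(x, 0) + 1
--     seen = 0
--     for x in reversed(a):
--         if counts[x] == 1:
--             seen += 1
--             if seen == 2: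
--                 return x
--     return 'None'
-- ===== Notes on version B (the rewrite author's own statement) =====
-- stated objective: alternative
-- what changed: Instead of materialising the full list of unique elements from the reversed dict, B scans reversed(a) itself, counts count==1 hits and short-circuits at the second one.
-- outside the precondition, e.g. on lastrepeat([1, 1, 2]): A returns 'None', B returns 'None'
import Mathlib
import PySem

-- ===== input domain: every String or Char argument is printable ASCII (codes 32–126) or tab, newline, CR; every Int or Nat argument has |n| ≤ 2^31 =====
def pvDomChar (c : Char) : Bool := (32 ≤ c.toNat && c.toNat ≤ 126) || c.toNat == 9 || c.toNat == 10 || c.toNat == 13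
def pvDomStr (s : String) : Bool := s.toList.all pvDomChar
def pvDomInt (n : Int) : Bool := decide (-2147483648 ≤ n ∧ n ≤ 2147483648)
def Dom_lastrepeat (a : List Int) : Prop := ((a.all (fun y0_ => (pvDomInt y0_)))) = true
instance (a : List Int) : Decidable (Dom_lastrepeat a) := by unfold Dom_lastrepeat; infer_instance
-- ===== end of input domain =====

-- B scans reversed(a) itself with an early exit instead of filtering the reversed dict; equivalence is about the return value on inputs with at least two unique elements.

-- ===== PORT A =====
def lastrepeat (a : List Int) : Int :=
  let b : PySem.Dict Int Int := a.foldl (fun d i => d.insert i (d.getD i 0 + 1)) PySem.Dict.empty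
  let unique : List Int := (b.keys.reverse).filter (fun i => b.getD i 0 == 1)
  if 2 ≤ unique.length then PySem.List.pyGetD unique 1 0
  else 0  -- Python A returns the STRING 'None' here, not an int: excluded by Pre_

-- ===== PORT B =====
def lastrepeatAltLoop (counts : PySem.Dict Int Int) : List Int → Nat → Int
  | [], _ => 0  -- Python B returns the STRING 'None' here: excluded by Pre_
  | x :: rest, seen =>
    if counts.getD x 0 == 1 then
      if seen + 1 = 2 then x else lastrepeatAltLoop counts rest (seen + 1)
    else lastrepeatAltLoop counts rest seen

def lastrepeat_alt (a : List Int) : Int :=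
  let counts : PySem.Dict Int Int := a.foldl (fun d x => d.insert x (d.getD x 0 + 1)) PySem.Dict.empty
  lastrepeatAltLoop counts a.reverse 0

-- ===== PRECONDITION & SPEC =====
-- Pre_ excludes inputs with fewer than two elements occurring exactly once: there both Pythons
-- return the string 'None', which is not a value of the declared Int return type.
def Pre_lastrepeat (a : List Int) : Prop :=
  2 ≤ (a.filter (fun x => a.count x == 1)).length
instance (a : List Int) : Decidable (Pre_lastrepeat a) := by unfold Pre_lastrepeat; infer_instance

def pvWitness_lastrepeat : List Int := [1, 2]

def Spec_lastrepeat (a : List Int) (out : Int) : Prop := out = lastrepeat_alt a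
instance (a : List Int) (out : Int) : Decidable (Spec_lastrepeat a out) := by unfold Spec_lastrepeat; infer_instance

-- ===== CLAIM (what is proved, stated in full; the proofs are below) =====
def Claim_equal_lastrepeat : Prop := ∀ (a : List Int), Dom_lastrepeat a → Pre_lastrepeat a → Spec_lastrepeat a (lastrepeat a)

-- ===== LEMMAS AND PROOFS =====

-- Filtering the first-occurrence set by a predicate that only holds on elements occurring at
-- most once in l gives the same list as filtering l itself.
theorem filter_ofList_of_count_le_one (l : List Int) (p : Int → Bool)
    (h : ∀ x, p x = true → l.count x ≤ 1) :
    (PySem.Set.ofList l).filter p = l.filter p := by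
  induction l using List.reverseRecOn with
  | nil => rfl
  | append_singleton l y ih =>
    have hle : ∀ x, p x = true → l.count x ≤ 1 := by
      intro x hx
      have := h x hx
      simp [List.count_append] at this
      omega
    rw [PySem.Set.ofList_append_singleton, PySem.Set.add_eq_ite]
    by_cases hy : y ∈ PySem.Set.ofList l
    · have hyl : y ∈ l := (PySem.Set.mem_ofList _ _).1 hy
      have hpy : p y = false := by
        by_contra hpy
        have hpy' : p y = true := by simpa using hpy
        have := h y hpy'
        have hc : 1 ≤ l.count y := List.one_le_count_iff.2 hyl
        simp [List.count_append] at this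
        omega
      simp [hy, List.filter_append, hpy, ih hle]
    · simp [hy, List.filter_append, ih hle]

-- The B loop returns the (2 - seen)-th remaining hit of the filtered list, or 0.
theorem lastrepeatAltLoop_spec (c : PySem.Dict Int Int) (l : List Int) (n : Nat) (hn : n ≤ 1) :
    lastrepeatAltLoop c l n =
      if 1 - n < (l.filter (fun x => c.getD x 0 == 1)).length then
        (l.filter (fun x => c.getD x 0 == 1)).getD (1 - n) 0
      else 0 := by
  induction l generalizing n with
  | nil => simp [lastrepeatAltLoop]
  | cons x rest ih =>
    by_cases hx : c.getD x 0 == 1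
    · rcases Nat.le_one_iff_eq_zero_or_eq_one.1 hn with h0 | h1
      · subst h0
        simp only [lastrepeatAltLoop, hx, if_true]
        rw [ih 1 (by omega)]
        simp [hx]
      · subst h1
        simp [lastrepeatAltLoop, hx]
    · have hx' : (c.getD x 0 == 1) = false := by simpa using hx
      simp only [lastrepeatAltLoop, hx', if_false, Bool.false_eq_true]
      rw [ih n hn]
      simp [hx']

-- ===== VERDICT (by name: the statement is the Claim_ definition above) =====
theorem lastrepeat_spec : Claim_equal_lastrepeat := by
  intro a _ hpre
  unfold Spec_lastrepeat lastrepeat lastrepeat_alt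
  -- both dicts are Counter(a)
  rw [PySem.Dict.foldl_insert_getD_add_one_eq_counter]
  simp only [PySem.Dict.keys_counter]
  have hgetD : ∀ x : Int, (PySem.Dict.counter a).getD x 0 = a.count x := by
    intro x; exact PySem.Dict.getD_counter a x
  -- rewrite the predicate to count-based
  have hpred : (fun i => (PySem.Dict.counter a).getD i 0 == 1) = (fun x : Int => a.count x == 1) := by
    funext i; rw [hgetD]; simp
  set p : Int → Bool := fun x : Int => a.count x == 1 with hp
  have hcle : ∀ x, p x = true → a.count x ≤ 1 := by
    intro x hx
    simp only [hp, beq_iff_eq] at hx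
    omega
  have hfil : (PySem.Set.ofList a).filter p = a.filter p :=
    filter_ofList_of_count_le_one a p hcle
  have hrev : (PySem.Set.ofList a).reverse.filter p = (a.reverse).filter p := by
    rw [List.filter_reverse, hfil, ← List.filter_reverse]
  rw [hpred, hrev]
  -- Pre_ gives length ≥ 2 of the reversed filtered list
  have hlen : 2 ≤ ((a.reverse).filter p).length := by
    rw [List.filter_reverse, List.length_reverse]
    simpa [hp] using hpre
  rw [lastrepeatAltLoop_spec (PySem.Dict.counter a) a.reverse 0 (by omega), hpred]
  have h1 : 1 - 0 < ((a.reverse).filter p).length := by omega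
  rw [if_pos hlen, if_pos h1]
  -- pyGetD at nonneg index 1 is getD 1
  rw [show ((1 : Int)) = ((1 : Nat) : Int) by norm_num, PySem.List.pyGetD_natCast]
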